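-- pv_equiv track=rewrite | github.com/L1r1h28/TCK-Python-Optimizer | cases/case_005_dictionary_lookup_comprehensive.py | optimized_version_batch_get
-- ===== SOURCE A (Python) =====
-- def optimized_version_batch_get(large_dict, test_keys):
--     """✅ 超級優化版本：批量操作優化
--
--     創新策略：
--     - 將存在和不存在的鍵分批處理
--     - 最小化異常處理和重複檢查
--     - 利用集合運算快速分類
--     """
--     # 快速分離存在和不存在的鍵
--     key_set = set(test_keys)
--     existing_keys = key_set & large_dict.keys()
--     missing_keys = key_set - existing_keys
--
--     # 創建結果映射
--     result_map = {}
--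
--     # 批量處理存在的鍵
--     for key in existing_keys:
--         result_map[key] = large_dict[key]
--
--     # 批量設置缺失鍵的預設值
--     for key in missing_keys:
--         result_map[key] = "default_value"
--
--     # 按原始順序返回結果
--     return [result_map[key] for key in test_keys]
-- ===== SOURCE B (Python) =====
-- def optimized_version_batch_get(large_dict, test_keys):
--     """Simpler: one direct pass over test_keys using dict.get with the default."""
--     return [large_dict.get(key, "default_value") for key in test_keys]
-- ===== Notes on version B (the rewrite author's own statement) =====
-- stated objective: simpler
-- what changed: Replaces the classify-into-existing/missing-sets, build-result_map, re-index pipeline with a single list comprehension that maps each key directly through dict.get(key, "default_value").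
import Mathlib
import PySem

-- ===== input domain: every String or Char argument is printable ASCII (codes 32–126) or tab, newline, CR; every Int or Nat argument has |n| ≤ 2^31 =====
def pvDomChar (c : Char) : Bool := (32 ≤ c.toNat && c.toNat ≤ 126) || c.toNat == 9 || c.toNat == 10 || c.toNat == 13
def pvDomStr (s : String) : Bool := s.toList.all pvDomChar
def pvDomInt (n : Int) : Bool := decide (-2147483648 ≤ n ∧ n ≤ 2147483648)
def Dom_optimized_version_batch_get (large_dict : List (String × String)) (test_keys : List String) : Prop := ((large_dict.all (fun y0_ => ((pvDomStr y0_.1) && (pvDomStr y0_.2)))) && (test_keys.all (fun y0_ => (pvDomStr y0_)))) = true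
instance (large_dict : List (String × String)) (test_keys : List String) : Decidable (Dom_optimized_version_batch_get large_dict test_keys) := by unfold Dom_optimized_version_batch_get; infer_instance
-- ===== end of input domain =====

-- B replaces A's set-classification + result_map pipeline by one direct pass mapping each key through dict-lookup-with-default (simpler decomposition; return-value equivalence).


-- ===== PORT A =====
-- literal transliteration of A: classify keys via set operations, build result_map, re-index.
-- large_dict[key] on an existing key is ported as getD with "" — unreachable default, key is present.
def optimized_version_batch_get (large_dict : List (String × String)) (test_keys : List String) : List String :=
  let d := PySem.Dict.mk large_dict
  let key_set : PySem.Set String := PySem.Set.ofList test_keys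
  let existing_keys : PySem.Set String := PySem.Set.inter key_set d.keys
  let missing_keys : PySem.Set String := PySem.Set.diff key_set existing_keys
  let result_map : PySem.Dict String String :=
    existing_keys.foldl (fun m k => m.insert k (d.getD k "")) PySem.Dict.empty
  let result_map : PySem.Dict String String :=
    missing_keys.foldl (fun m k => m.insert k "default_value") result_map
  test_keys.map (fun k => result_map.getD k "")

-- ===== PORT B =====
def optimized_version_batch_get_alt (large_dict : List (String × String)) (test_keys : List String) : List String :=
  test_keys.map (fun k => (PySem.Dict.mk large_dict).getD k "default_value")

-- ===== PRECONDITION & SPEC =====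
def Spec_optimized_version_batch_get (large_dict : List (String × String)) (test_keys : List String) (out : List String) : Prop := out = optimized_version_batch_get_alt large_dict test_keys
instance (large_dict : List (String × String)) (test_keys : List String) (out : List String) : Decidable (Spec_optimized_version_batch_get large_dict test_keys out) := by unfold Spec_optimized_version_batch_get; infer_instance

-- ===== CLAIM (what is proved, stated in full; the proofs are below) =====
def Claim_equal_optimized_version_batch_get : Prop := ∀ (large_dict : List (String × String)) (test_keys : List String), Dom_optimized_version_batch_get large_dict test_keys → Spec_optimized_version_batch_get large_dict test_keys (optimized_version_batch_get large_dict test_keys)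

-- ===== LEMMAS AND PROOFS =====

-- a fold of inserts with value f k: lookup is f k on the inserted keys, unchanged elsewhere
theorem getD_foldl_insert_fun (L : List String) (f : String → String) (m : PySem.Dict String String) (k x : String) :
    (L.foldl (fun m k => m.insert k (f k)) m).getD k x = if k ∈ L then f k else m.getD k x := by
  induction L generalizing m with
  | nil => simp
  | cons a rest ih =>
    simp only [List.foldl_cons, ih, PySem.Dict.getD_insert, List.mem_cons]
    by_cases hr : k ∈ rest
    · simp [hr]
    · by_cases ha : k = a <;> simp [hr, ha]

theorem optimized_version_batch_get_spec : Claim_equal_optimized_version_batch_get := by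
  intro large_dict test_keys _
  unfold Spec_optimized_version_batch_get
  simp only [optimized_version_batch_get, optimized_version_batch_get_alt]
  apply List.map_congr_left
  intro k hk
  set d := PySem.Dict.mk large_dict with hd
  have hks : k ∈ PySem.Set.ofList test_keys := (PySem.Set.mem_ofList _ _).2 hk
  rw [getD_foldl_insert_fun (f := fun _ => "default_value"),
      getD_foldl_insert_fun (f := fun k => d.getD k "")]
  by_cases hc : d.contains k = true
  · have hmemk : k ∈ d.keys := (PySem.Dict.contains_iff_mem_keys _ _).1 hc
    have hex : k ∈ PySem.Set.inter (PySem.Set.ofList test_keys) d.keys :=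
      (PySem.Set.mem_inter _ _ _).2 ⟨hks, hmemk⟩
    have hmiss : k ∉ PySem.Set.diff (PySem.Set.ofList test_keys)
        (PySem.Set.inter (PySem.Set.ofList test_keys) d.keys) := by
      intro h
      exact ((PySem.Set.mem_diff _ _ _).1 h).2 hex
    obtain ⟨v, hv⟩ : ∃ v, d.get? k = some v := by
      have := PySem.Dict.contains_eq_isSome_get? (d := d) (k := k)
      rw [hc] at this
      exact Option.isSome_iff_exists.1 this.symm
    simp [hmiss, hex, PySem.Dict.getD_eq_get?_getD, hv]
  · have hnc : d.contains k = false := by simpa using hc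
    have hmemk : k ∉ d.keys := fun h => hc ((PySem.Dict.contains_iff_mem_keys _ _).2 h)
    have hex : k ∉ PySem.Set.inter (PySem.Set.ofList test_keys) d.keys := by
      intro h
      exact hmemk ((PySem.Set.mem_inter _ _ _).1 h).2
    have hmiss : k ∈ PySem.Set.diff (PySem.Set.ofList test_keys)
        (PySem.Set.inter (PySem.Set.ofList test_keys) d.keys) :=
      (PySem.Set.mem_diff _ _ _).2 ⟨hks, hex⟩
    have h0 : d.get? k = none := by
      have h1 := PySem.Dict.contains_eq_isSome_get? d k
      rw [hnc] at h1
      simpa using h1.symm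
    simp [hmiss, PySem.Dict.getD_eq_get?_getD, h0]
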